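-- pv_equiv track=rewrite | github.com/People-of-the-Approximation/Sanghyeok | 01_Python_Code/softmax_batch.py | split_depths
-- ===== SOURCE A (Python) =====
-- def split_depths(
--     total_rows: int, len_mode: int, max_rows_per_tx: int = 128
-- ) -> list[int]:
--     if total_rows <= 0:
--         return []
--     if not (0 <= len_mode <= 15):
--         raise ValueError("len_mode must be 0..15")
--     if max_rows_per_tx < 1 or max_rows_per_tx > 128:
--         raise ValueError("max_rows_per_tx must be 1..128")
--     if len_mode <= 2:
--         group = 1
--     else:
--         group = len_mode - 1
--
--     if group > max_rows_per_tx: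
--         raise ValueError(f"group({group}) > max_rows_per_tx({max_rows_per_tx})")
--     if total_rows % group != 0:
--         raise ValueError(
--             f"total_rows({total_rows}) must be a multiple of group({group}) for len_mode={len_mode}"
--         )
--
--     depths: list[int] = []
--     rem = total_rows
--     while rem > 0:
--         groups_fit = min(rem // group, max_rows_per_tx // group)
--         rows = groups_fit * group
--         depths.append(rows - 1)
--         rem -= rows
--
--     return depths
-- ===== SOURCE B (Python) =====
-- def split_depths(
--     total_rows: int, len_mode: int, max_rows_per_tx: int = 128
-- ) -> list[int]:
--     if total_rows <= 0:
--         return []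
--     if not (0 <= len_mode <= 15):
--         raise ValueError("len_mode must be 0..15")
--     if max_rows_per_tx < 1 or max_rows_per_tx > 128:
--         raise ValueError("max_rows_per_tx must be 1..128")
--     group = 1 if len_mode <= 2 else len_mode - 1
--     if group > max_rows_per_tx:
--         raise ValueError(f"group({group}) > max_rows_per_tx({max_rows_per_tx})")
--     if total_rows % group != 0:
--         raise ValueError(
--             f"total_rows({total_rows}) must be a multiple of group({group}) for len_mode={len_mode}"
--         )
--     chunk = (max_rows_per_tx // group) * group
--     q, r = divmod(total_rows, chunk)
--     depths = [chunk - 1] * q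
--     if r > 0:
--         depths.append(r - 1)
--     return depths
-- ===== Notes on version B (the rewrite author's own statement) =====
-- stated objective: simpler
-- what changed: Replaced the accumulating while-loop with a closed form: chunk = (max_rows_per_tx//group)*group, q,r = divmod(total_rows, chunk), return [chunk-1]*q plus [r-1] if r>0; validation prologue kept verbatim.
import Mathlib
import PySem

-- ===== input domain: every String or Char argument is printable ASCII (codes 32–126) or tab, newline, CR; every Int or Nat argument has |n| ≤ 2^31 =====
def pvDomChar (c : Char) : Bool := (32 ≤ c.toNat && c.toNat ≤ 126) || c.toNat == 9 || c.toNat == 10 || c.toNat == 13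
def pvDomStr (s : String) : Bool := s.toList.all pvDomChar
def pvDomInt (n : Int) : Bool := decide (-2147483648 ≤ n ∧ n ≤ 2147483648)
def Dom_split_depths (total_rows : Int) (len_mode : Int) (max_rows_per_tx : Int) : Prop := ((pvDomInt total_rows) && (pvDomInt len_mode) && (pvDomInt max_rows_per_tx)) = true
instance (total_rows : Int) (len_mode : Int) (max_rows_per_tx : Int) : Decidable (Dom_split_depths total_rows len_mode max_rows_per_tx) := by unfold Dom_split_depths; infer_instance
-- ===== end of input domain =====

-- B replaces A's chunk-accumulating while-loop by a closed-form divmod construction (simpler); the validation prologue is unchanged.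

-- ===== PORT A =====
-- the while-loop of A; fuel is only a totality guard (inside Pre_ each iteration removes ≥ 1 row)
def splitLoopA (group mrt : Int) : Nat → Int → List Int → List Int
  | 0, _, depths => depths
  | fuel + 1, rem, depths =>
    if rem > 0 then
      let groups_fit := min (PySem.Int.floordiv rem group) (PySem.Int.floordiv mrt group)
      let rows := groups_fit * group
      splitLoopA group mrt fuel (rem - rows) (depths ++ [rows - 1])
    else depths

def split_depths (total_rows : Int) (len_mode : Int) (max_rows_per_tx : Int) : List Int :=
  if total_rows ≤ 0 then []
  else if ¬ (0 ≤ len_mode ∧ len_mode ≤ 15) then []      -- Python: raise ValueError (outside Pre_)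
  else if max_rows_per_tx < 1 ∨ max_rows_per_tx > 128 then []  -- raise ValueError (outside Pre_)
  else
    let group := if len_mode ≤ 2 then (1 : Int) else len_mode - 1
    if group > max_rows_per_tx then []                  -- raise ValueError (outside Pre_)
    else if PySem.Int.mod total_rows group ≠ 0 then []  -- raise ValueError (outside Pre_)
    else splitLoopA group max_rows_per_tx total_rows.toNat total_rows []

-- ===== PORT B =====
def split_depths_alt (total_rows : Int) (len_mode : Int) (max_rows_per_tx : Int) : List Int :=
  if total_rows ≤ 0 then []
  else if ¬ (0 ≤ len_mode ∧ len_mode ≤ 15) then []      -- Python: raise ValueError (outside Pre_)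
  else if max_rows_per_tx < 1 ∨ max_rows_per_tx > 128 then []  -- raise ValueError (outside Pre_)
  else
    let group := if len_mode ≤ 2 then (1 : Int) else len_mode - 1
    if group > max_rows_per_tx then []                  -- raise ValueError (outside Pre_)
    else if PySem.Int.mod total_rows group ≠ 0 then []  -- raise ValueError (outside Pre_)
    else
      let chunk := PySem.Int.floordiv max_rows_per_tx group * group
      let q := PySem.Int.floordiv total_rows chunk
      let r := PySem.Int.mod total_rows chunk
      List.replicate q.toNat (chunk - 1) ++ (if r > 0 then [r - 1] else [])

-- ===== PRECONDITION & SPEC =====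
-- Pre_ excludes exactly the inputs on which A raises ValueError (the four validation guards).
def Pre_split_depths (total_rows : Int) (len_mode : Int) (max_rows_per_tx : Int) : Prop :=
  total_rows ≤ 0 ∨
    (0 ≤ len_mode ∧ len_mode ≤ 15 ∧ 1 ≤ max_rows_per_tx ∧ max_rows_per_tx ≤ 128 ∧
     (if len_mode ≤ 2 then (1 : Int) else len_mode - 1) ≤ max_rows_per_tx ∧
     PySem.Int.mod total_rows (if len_mode ≤ 2 then (1 : Int) else len_mode - 1) = 0)
instance (total_rows : Int) (len_mode : Int) (max_rows_per_tx : Int) : Decidable (Pre_split_depths total_rows len_mode max_rows_per_tx) := by unfold Pre_split_depths; infer_instance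

def pvWitness_split_depths : Int × Int × Int := (20, 3, 7)

def Spec_split_depths (total_rows : Int) (len_mode : Int) (max_rows_per_tx : Int) (out : List Int) : Prop := out = split_depths_alt total_rows len_mode max_rows_per_tx
instance (total_rows : Int) (len_mode : Int) (max_rows_per_tx : Int) (out : List Int) : Decidable (Spec_split_depths total_rows len_mode max_rows_per_tx out) := by unfold Spec_split_depths; infer_instance

-- ===== CLAIM (what is proved, stated in full; the proofs are below) =====
def Claim_equal_split_depths : Prop := ∀ (total_rows : Int) (len_mode : Int) (max_rows_per_tx : Int), Dom_split_depths total_rows len_mode max_rows_per_tx → Pre_split_depths total_rows len_mode max_rows_per_tx → Spec_split_depths total_rows len_mode max_rows_per_tx (split_depths total_rows len_mode max_rows_per_tx)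

-- ===== LEMMAS AND PROOFS =====

-- Characterisation of A's loop: with 1 ≤ group ≤ mrt, chunk = (mrt//group)*group,
-- group ∣ rem, 0 ≤ rem and enough fuel, the loop appends q copies of chunk-1 and the remainder.
theorem splitLoopA_eq (group mrt : Int) (hg : 1 ≤ group) (hgm : group ≤ mrt) :
    ∀ (fuel : Nat) (rem : Int) (depths : List Int),
      0 ≤ rem → group ∣ rem → rem.toNat ≤ fuel →
      splitLoopA group mrt fuel rem depths =
        depths ++
          List.replicate (rem / (mrt / group * group)).toNat (mrt / group * group - 1) ++
          (if rem % (mrt / group * group) > 0 then [rem % (mrt / group * group) - 1] else []) := by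
  have hc1 : 1 ≤ mrt / group := by
    rw [Int.le_ediv_iff_mul_le (by omega : (0:Int) < group)]; omega
  have hc : group ≤ mrt / group * group := by
    calc group = 1 * group := (one_mul group).symm
    _ ≤ mrt / group * group := by
      apply mul_le_mul_of_nonneg_right hc1 (by omega)
  set c := mrt / group * group with hcdef
  intro fuel
  induction fuel with
  | zero =>
    intro rem depths h0 _ hf
    have : rem = 0 := by omega
    subst this
    simp [splitLoopA]
  | succ n ih =>
    intro rem depths h0 hdvd hf
    by_cases hpos : rem > 0
    · have hfd : PySem.Int.floordiv rem group = rem / group :=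
        PySem.Int.floordiv_eq_ediv_of_pos (by omega)
      have hfd2 : PySem.Int.floordiv mrt group = mrt / group :=
        PySem.Int.floordiv_eq_ediv_of_pos (by omega)
      have hcancel : rem / group * group = rem := Int.ediv_mul_cancel hdvd
      have hrows : min (PySem.Int.floordiv rem group) (PySem.Int.floordiv mrt group) * group
          = min rem c := by
        rw [hfd, hfd2, min_mul_of_nonneg _ _ (by omega : (0:Int) ≤ group), hcancel]
      rw [splitLoopA, if_pos hpos]
      simp only [hrows]
      by_cases hbig : c ≤ rem
      · -- a full chunk fits: rows = c
        have hmin : min rem c = c := min_eq_right hbig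
        rw [hmin]
        have hrec := ih (rem - c) (depths ++ [c - 1]) (by omega)
          (by
            rcases hdvd with ⟨k, hk⟩
            exact ⟨k - mrt / group, by rw [hk]; ring⟩)
          (by omega)
        rw [hrec]
        have hq : rem / c = (rem - c) / c + 1 := by
          conv_lhs => rw [show rem = (rem - c) + 1 * c by ring]
          rw [Int.add_mul_ediv_right _ _ (by omega : c ≠ 0)]
        have hr : (rem - c) % c = rem % c := by
          conv_rhs => rw [show rem = (rem - c) + 1 * c by ring]
          exact (Int.add_mul_emod_self_right _ 1 c).symm
        have hnn : 0 ≤ (rem - c) / c := Int.ediv_nonneg (by omega) (by omega)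
        have hrep : (rem / c).toNat = ((rem - c) / c).toNat + 1 := by omega
        rw [hrep, hr, List.replicate_succ]
        simp
      · -- last, partial chunk: rows = rem, next rem = 0
        have hmin : min rem c = rem := min_eq_left (by omega)
        rw [hmin, sub_self]
        have hdone : splitLoopA group mrt n 0 (depths ++ [rem - 1]) = depths ++ [rem - 1] := by
          cases n <;> simp [splitLoopA]
        rw [hdone]
        have hq : rem / c = 0 := Int.ediv_eq_zero_of_lt (by omega) (by omega)
        have hr : rem % c = rem := Int.emod_eq_of_lt (by omega) (by omega)
        rw [hq, hr, if_pos hpos]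
        simp
    · have : rem = 0 := by omega
      subst this
      simp [splitLoopA]

-- ===== VERDICT (by name: the statement is the Claim_ definition above) =====
theorem split_depths_spec : Claim_equal_split_depths := by
  intro t lm mrt _ hpre
  unfold Spec_split_depths split_depths split_depths_alt
  by_cases h0 : t ≤ 0
  · simp [h0]
  rcases hpre with h | ⟨h1, h2, h3, h4, h5, h6⟩
  · omega
  rw [if_neg h0, if_neg h0]
  by_cases hlm : lm ≤ 2
  · -- group = 1
    simp only [if_pos hlm] at h5 h6 ⊢
    rw [if_neg (by omega), if_neg (by omega), if_neg (by omega), if_neg (by simp),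
        if_neg (by omega), if_neg (by omega), if_neg (by omega),
        if_neg (by simp)]
    have := splitLoopA_eq 1 mrt (le_refl 1) h5 t.toNat t [] (by omega)
      ((PySem.Int.mod_eq_zero_iff_dvd t 1).mp h6) (le_refl _)
    rw [this, PySem.Int.floordiv_eq_ediv_of_pos (by omega : (0:Int) < 1)]
    have hc1 : 1 ≤ mrt / 1 := by
      rw [Int.le_ediv_iff_mul_le (by omega : (0:Int) < 1)]; omega
    rw [PySem.Int.floordiv_eq_ediv_of_pos (by nlinarith), PySem.Int.mod_eq_emod_of_pos (by nlinarith)]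
    simp
  · -- group = lm - 1
    simp only [if_neg hlm] at h5 h6 ⊢
    rw [if_neg (by omega), if_neg (by omega), if_neg (by omega), if_neg (by simpa using h6),
        if_neg (by omega), if_neg (by omega), if_neg (by omega),
        if_neg (by simpa using h6)]
    have hg : (1:Int) ≤ lm - 1 := by omega
    have := splitLoopA_eq (lm - 1) mrt hg h5 t.toNat t [] (by omega)
      ((PySem.Int.mod_eq_zero_iff_dvd t (lm - 1)).mp h6) (le_refl _)
    rw [this, PySem.Int.floordiv_eq_ediv_of_pos (by omega : (0:Int) < lm - 1)]
    have hc1 : 1 ≤ mrt / (lm - 1) := by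
      rw [Int.le_ediv_iff_mul_le (by omega : (0:Int) < lm - 1)]; omega
    rw [PySem.Int.floordiv_eq_ediv_of_pos (by nlinarith), PySem.Int.mod_eq_emod_of_pos (by nlinarith)]
    simp
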